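-- pv_equiv track=rewrite | github.com/pypi-data/pypi-mirror-365 | packages/cmipld/cmipld-0.0.6-py3-none-any.whl/cmipld/utils/validate_json.py | sort_json_keys
-- ===== SOURCE A (Python) =====
-- from typing import Dict, Any, List, Tuple, Optional
-- from collections import OrderedDict
--
-- def sort_json_keys(data: Dict[str, Any]) -> OrderedDict:
--     sorted_data = OrderedDict()
--     priority_keys = ['id', 'validation-key', 'ui-label', 'description']
--     for key in priority_keys:
--         if key in data:
--             sorted_data[key] = data[key]
--
--     remaining_keys = sorted([
--         k for k in data.keys()
--         if k not in priority_keys and k not in ['@context', 'type']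
--     ])
--     for key in remaining_keys:
--         sorted_data[key] = data[key]
--
--     if '@context' in data:
--         sorted_data['@context'] = data['@context']
--     if 'type' in data:
--         sorted_data['type'] = data['type']
--
--     return sorted_data
-- ===== SOURCE B (Python) =====
-- from collections import OrderedDict
--
-- def sort_json_keys(data):
--     priority_keys = ['id', 'validation-key', 'ui-label', 'description']
--     trailing_keys = ['@context', 'type']
--
--     def rank1(k):
--         if k in priority_keys:
--             return priority_keys.index(k)
--         if k in trailing_keys:
--             return 5 + trailing_keys.index(k)
--         return 4
--
--     def rank2(k):
--         if k in priority_keys or k in trailing_keys: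
--             return ''
--         return k
--
--     out = OrderedDict()
--     for k in sorted(data.keys(), key=lambda k: (rank1(k), rank2(k))):
--         out[k] = data[k]
--     return out
-- ===== Notes on version B (the rewrite author's own statement) =====
-- stated objective: idiomatic
-- what changed: A's three phased passes (priority loop, sorted-middle loop, trailing ifs) are replaced by one composite sort: each key gets a (rank, tiebreak) pair and a single sorted() + one build loop produces the dict.
import Mathlib
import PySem

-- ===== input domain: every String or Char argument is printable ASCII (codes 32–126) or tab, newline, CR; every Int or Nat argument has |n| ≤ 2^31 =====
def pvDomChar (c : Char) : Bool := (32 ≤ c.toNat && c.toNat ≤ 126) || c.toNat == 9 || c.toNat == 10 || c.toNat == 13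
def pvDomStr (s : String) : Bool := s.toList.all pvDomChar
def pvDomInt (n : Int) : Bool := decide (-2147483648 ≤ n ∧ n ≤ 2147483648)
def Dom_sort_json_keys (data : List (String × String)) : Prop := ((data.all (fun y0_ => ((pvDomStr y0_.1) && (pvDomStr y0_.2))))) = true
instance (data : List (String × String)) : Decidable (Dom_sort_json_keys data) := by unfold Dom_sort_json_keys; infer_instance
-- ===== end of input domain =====

-- B replaces A's three phased passes by one composite-key sort plus a single build loop (idiomatic; same cost).

-- ===== PORT A =====
-- the Python dict argument: insertion order, last value wins
def sort_json_keys (data : List (String × String)) : List (String × String) :=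
  let d := PySem.Dict.ofList data
  let priority_keys := ["id", "validation-key", "ui-label", "description"]
  let sd1 := priority_keys.foldl
    (fun sd key => if d.contains key then sd.insert key (d.getD key "") else sd)
    (PySem.Dict.empty : PySem.Dict String String)
  let remaining_keys := PySem.List.sorted
    (d.keys.filter (fun k => !(priority_keys.contains k) && !((["@context", "type"] : List String).contains k)))
    (fun k => k) false
  let sd2 := remaining_keys.foldl (fun sd key => sd.insert key (d.getD key "")) sd1
  let sd3 := if d.contains "@context" then sd2.insert "@context" (d.getD "@context" "") else sd2
  let sd4 := if d.contains "type" then sd3.insert "type" (d.getD "type" "") else sd3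
  sd4.items

-- ===== PORT B =====
def pvRank1 (k : String) : Int :=
  if ["id", "validation-key", "ui-label", "description"].contains k then
    (PySem.List.index? ["id", "validation-key", "ui-label", "description"] k).getD 0
  else if ["@context", "type"].contains k then
    5 + (PySem.List.index? ["@context", "type"] k).getD 0
  else 4

def pvRank2 (k : String) : String :=
  if ["id", "validation-key", "ui-label", "description"].contains k
     || ["@context", "type"].contains k then "" else k

def sort_json_keys_alt (data : List (String × String)) : List (String × String) :=
  let d := PySem.Dict.ofList data
  let ordered := PySem.List.sorted2 d.keys pvRank1 pvRank2 false
  (ordered.foldl (fun out k => out.insert k (d.getD k ""))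
    (PySem.Dict.empty : PySem.Dict String String)).items

-- ===== PRECONDITION & SPEC =====
def Spec_sort_json_keys (data : List (String × String)) (out : List (String × String)) : Prop := out = sort_json_keys_alt data
instance (data : List (String × String)) (out : List (String × String)) : Decidable (Spec_sort_json_keys data out) := by unfold Spec_sort_json_keys; infer_instance

-- ===== CLAIM (what is proved, stated in full; the proofs are below) =====
def Claim_equal_sort_json_keys : Prop := ∀ (data : List (String × String)), Dom_sort_json_keys data → Spec_sort_json_keys data (sort_json_keys data)

-- ===== LEMMAS AND PROOFS =====
def pvK (k : String) : Int ×ₗ String := toLex (pvRank1 k, pvRank2 k)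

def pvPr : List String := ["id", "validation-key", "ui-label", "description"]
def pvTr : List String := ["@context", "type"]
def pvMidp (k : String) : Bool := !(pvPr.contains k) && !(pvTr.contains k)

lemma sorted2_eq_sorted_lex {α : Type} (xs : List α) (k1 : α → Int) (k2 : α → String) :
    PySem.List.sorted2 xs k1 k2 false
      = PySem.List.sorted xs (fun x => (toLex (k1 x, k2 x) : Int ×ₗ String)) false := by
  show List.foldl _ [] xs = List.foldl _ [] xs
  congr 1
  funext acc x
  congr 1
  funext a b
  show (decide (k1 a < k1 b) || (!decide (k1 b < k1 a) && decide (k2 a < k2 b)))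
      = decide ((toLex (k1 a, k2 a) : Int ×ₗ String) < toLex (k1 b, k2 b))
  rcases lt_trichotomy (k1 a) (k1 b) with h | h | h
  · simp [h, Prod.Lex.lt_iff]
  · simp [h, Prod.Lex.lt_iff]
  · have h1 : ¬ k1 a < k1 b := h.not_gt
    have h2 : k1 a ≠ k1 b := h.ne'
    simp [h1, h, Prod.Lex.lt_iff, h2]

lemma rank_pr {k : String} (h : k ∈ pvPr) : pvRank1 k ≤ 3 := by
  simp [pvPr] at h
  rcases h with h|h|h|h <;> subst h <;> decide

lemma rank_mid {k : String} (h : pvMidp k = true) : pvRank1 k = 4 ∧ pvRank2 k = k := by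
  simp [pvMidp, pvPr, pvTr] at h
  obtain ⟨⟨h1, h2, h3, h4⟩, h5, h6⟩ := h
  constructor <;> simp [pvRank1, pvRank2, h1, h2, h3, h4, h5, h6]

lemma rank_tr {k : String} (h : k ∈ pvTr) : 5 ≤ pvRank1 k := by
  simp [pvTr] at h
  rcases h with h|h <;> subst h <;> decide

lemma lt_of_rank1_lt {a b : String} (h : pvRank1 a < pvRank1 b) : pvK a < pvK b := by
  simp [pvK, Prod.Lex.lt_iff]; exact Or.inl h

lemma tr_not_pr : ∀ k ∈ pvTr, pvPr.contains k = false := by decide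

lemma L2 (ks : List String) (hnd : ks.Nodup) :
    PySem.List.sorted ks pvK false
      = pvPr.filter (fun k => ks.contains k)
        ++ PySem.List.sorted (ks.filter pvMidp) (fun k => k) false
        ++ pvTr.filter (fun k => ks.contains k) := by
  set P := pvPr.filter (fun k => ks.contains k) with hP
  set M := PySem.List.sorted (ks.filter pvMidp) (fun k => k) false with hM
  set T := pvTr.filter (fun k => ks.contains k) with hT
  have hMperm : M.Perm (ks.filter pvMidp) := PySem.List.sorted_perm _ _ _
  have hMmem : ∀ k ∈ M, pvMidp k = true := by
    intro k hk
    exact (List.mem_filter.mp (hMperm.mem_iff.mp hk)).2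
  have hMnd : M.Nodup := hMperm.nodup_iff.mpr (hnd.filter _)
  have hPmem : ∀ k ∈ P, k ∈ pvPr := fun k hk => (List.mem_filter.mp hk).1
  have hTmem : ∀ k ∈ T, k ∈ pvTr := fun k hk => (List.mem_filter.mp hk).1
  apply PySem.List.sorted_eq_of_perm_of_pairwise_lt
  · -- Permutation: P ++ M ++ T ~ ks
    have hsplit1 : (ks.filter (fun k => pvPr.contains k)
        ++ ks.filter (fun k => !(pvPr.contains k))).Perm ks := List.filter_append_perm _ ks
    have hsplit2 : ((ks.filter (fun k => !(pvPr.contains k))).filter (fun k => !(pvTr.contains k))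
        ++ (ks.filter (fun k => !(pvPr.contains k))).filter (fun k => pvTr.contains k)).Perm
        (ks.filter (fun k => !(pvPr.contains k))) := by
      have := List.filter_append_perm (fun k => !(pvTr.contains k))
        (ks.filter (fun k => !(pvPr.contains k)))
      simpa using this
    have hmid : (ks.filter (fun k => !(pvPr.contains k))).filter (fun k => !(pvTr.contains k))
        = ks.filter pvMidp := by
      rw [List.filter_filter]
      apply List.filter_congr
      intro x _
      simp [pvMidp, Bool.and_comm]
    have htr : (ks.filter (fun k => !(pvPr.contains k))).filter (fun k => pvTr.contains k)
        = ks.filter (fun k => pvTr.contains k) := by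
      rw [List.filter_filter]
      apply List.filter_congr
      intro x _
      cases hxt : pvTr.contains x with
      | false => rw [Bool.false_and]
      | true =>
        rw [Bool.true_and]
        have hm : x ∈ pvTr := by simpa using hxt
        rw [tr_not_pr x hm]
        rfl
    have hPperm : P.Perm (ks.filter (fun k => pvPr.contains k)) := by
      rw [List.perm_ext_iff_of_nodup ((by decide : pvPr.Nodup).filter _) (hnd.filter _)]
      intro a
      simp [List.mem_filter]
      tauto
    have hTperm : T.Perm (ks.filter (fun k => pvTr.contains k)) := by
      rw [List.perm_ext_iff_of_nodup ((by decide : pvTr.Nodup).filter _) (hnd.filter _)]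
      intro a
      simp [List.mem_filter]
      tauto
    have h3 : (M ++ T).Perm (ks.filter (fun k => !(pvPr.contains k))) := by
      refine List.Perm.trans (hMperm.append hTperm) ?_
      rw [← hmid, ← htr]
      exact hsplit2
    rw [List.append_assoc]
    exact (hPperm.append h3).trans hsplit1
  · -- Pairwise strictly increasing under pvK
    have hPp : P.Pairwise (fun a b => pvK a < pvK b) := by
      refine List.Pairwise.sublist (List.filter_sublist) ?_
      have h1 : pvK "id" < pvK "validation-key" := lt_of_rank1_lt (by decide)
      have h2 : pvK "id" < pvK "ui-label" := lt_of_rank1_lt (by decide)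
      have h3 : pvK "id" < pvK "description" := lt_of_rank1_lt (by decide)
      have h4 : pvK "validation-key" < pvK "ui-label" := lt_of_rank1_lt (by decide)
      have h5 : pvK "validation-key" < pvK "description" := lt_of_rank1_lt (by decide)
      have h6 : pvK "ui-label" < pvK "description" := lt_of_rank1_lt (by decide)
      simp [pvPr, List.pairwise_cons, h1, h2, h3, h4, h5, h6]
    have hTp : T.Pairwise (fun a b => pvK a < pvK b) := by
      refine List.Pairwise.sublist (List.filter_sublist) ?_
      have h1 : pvK "@context" < pvK "type" := lt_of_rank1_lt (by decide)
      simp [pvTr, List.pairwise_cons, h1]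
    have hMp : M.Pairwise (fun a b => pvK a < pvK b) := by
      have hle : M.Pairwise (fun a b => a ≤ b) := by
        rw [hM]
        exact PySem.List.sorted_pairwise _ _
      have hne : M.Pairwise (fun a b => a ≠ b) := hMnd
      refine ((hle.and hne).imp_of_mem ?_)
      intro a b ha hb hab
      obtain ⟨r1a, r2a⟩ := rank_mid (hMmem a ha)
      obtain ⟨r1b, r2b⟩ := rank_mid (hMmem b hb)
      simp only [pvK, Prod.Lex.lt_iff, ofLex_toLex]
      right
      refine ⟨by rw [r1a, r1b], ?_⟩
      rw [r2a, r2b]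
      exact lt_of_le_of_ne hab.1 hab.2
    rw [List.append_assoc, List.pairwise_append]
    refine ⟨hPp, ?_, ?_⟩
    · rw [List.pairwise_append]
      refine ⟨hMp, hTp, ?_⟩
      intro a ha b hb
      refine lt_of_rank1_lt ?_
      have h4 := (rank_mid (hMmem a ha)).1
      have h5 := rank_tr (hTmem b hb)
      omega
    · intro a ha b hb
      refine lt_of_rank1_lt ?_
      have hp := rank_pr (hPmem a ha)
      rcases List.mem_append.mp hb with hb | hb
      · have := (rank_mid (hMmem b hb)).1
        omega
      · have := rank_tr (hTmem b hb)
        omega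


lemma pv_contains (d : PySem.Dict String String) (k : String) :
    d.contains k = d.keys.contains k := by
  by_cases h : k ∈ d.keys
  · rw [(PySem.Dict.contains_iff_mem_keys d k).mpr h]
    simpa using h
  · have h1 : d.contains k = false := by
      cases hck : d.contains k with
      | false => rfl
      | true => exact absurd ((PySem.Dict.contains_iff_mem_keys d k).mp hck) h
    rw [h1]
    symm
    simpa using h

lemma pv_T_split (d : PySem.Dict String String) :
    (pvTr.filter (fun k => d.keys.contains k)).map (fun k => (k, d.getD k ""))
      = (if d.contains "@context" = true then [("@context", d.getD "@context" "")] else [])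
        ++ (if d.contains "type" = true then [("type", d.getD "type" "")] else []) := by
  by_cases h1 : d.contains "@context" = true
    <;> by_cases h2 : d.contains "type" = true
    <;> simp only [pvTr, List.filter_cons, List.filter_nil, ← pv_contains]
    <;> simp [h1, h2]

lemma pv_B_eval (d : PySem.Dict String String) (hnd : d.keys.Nodup) :
    (List.foldl (fun out k => out.insert k (d.getD k ""))
        (PySem.Dict.empty : PySem.Dict String String)
        (PySem.List.sorted2 d.keys pvRank1 pvRank2 false)).items
      = (pvPr.filter (fun k => d.keys.contains k)).map (fun k => (k, d.getD k ""))
        ++ (PySem.List.sorted (d.keys.filter pvMidp) (fun k => k) false).map (fun k => (k, d.getD k ""))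
        ++ (pvTr.filter (fun k => d.keys.contains k)).map (fun k => (k, d.getD k "")) := by
  rw [sorted2_eq_sorted_lex]
  have hKeq : (fun x => (toLex (pvRank1 x, pvRank2 x) : Int ×ₗ String)) = pvK := rfl
  rw [hKeq]
  have hl : (PySem.List.sorted d.keys pvK false).Nodup :=
    (PySem.List.sorted_perm _ _ _).nodup_iff.mpr hnd
  rw [PySem.Dict.items_foldl_insert_fresh _ (fun a => a) (fun a => d.getD a "") _
        (by intro a _; exact PySem.Dict.contains_empty a)
        (by simpa using hl)]
  rw [L2 _ hnd]
  have hempty : (PySem.Dict.empty : PySem.Dict String String).items = [] := rfl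
  rw [hempty, List.nil_append]
  simp [List.map_append]

lemma pv_A_eval (d : PySem.Dict String String) (hnd : d.keys.Nodup) :
    (let sd1 := pvPr.foldl
        (fun sd key => if d.contains key then sd.insert key (d.getD key "") else sd)
        (PySem.Dict.empty : PySem.Dict String String)
     let remaining := PySem.List.sorted (d.keys.filter pvMidp) (fun k => k) false
     let sd2 := remaining.foldl (fun sd key => sd.insert key (d.getD key "")) sd1
     let sd3 := if d.contains "@context" then sd2.insert "@context" (d.getD "@context" "") else sd2
     let sd4 := if d.contains "type" then sd3.insert "type" (d.getD "type" "") else sd3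
     sd4.items)
      = (pvPr.filter (fun k => d.keys.contains k)).map (fun k => (k, d.getD k ""))
        ++ (PySem.List.sorted (d.keys.filter pvMidp) (fun k => k) false).map (fun k => (k, d.getD k ""))
        ++ ((if d.contains "@context" = true then [("@context", d.getD "@context" "")] else [])
            ++ (if d.contains "type" = true then [("type", d.getD "type" "")] else [])) := by
  simp only []
  set P := pvPr.filter (fun k => d.keys.contains k) with hP
  set M := PySem.List.sorted (d.keys.filter pvMidp) (fun k => k) false with hM
  -- first loop: the guarded fold is a fold over the filtered priority list
  rw [PySem.List.foldl_if_eq_foldl_filter (fun key => d.contains key)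
        (fun sd key => sd.insert key (d.getD key "")) pvPr PySem.Dict.empty]
  have hfc : pvPr.filter (fun key => d.contains key) = P := by
    rw [hP]
    exact List.filter_congr (fun x _ => pv_contains d x)
  rw [hfc, ← List.foldl_append]
  -- facts about P and M
  have hPsub : ∀ k ∈ P, k ∈ pvPr := fun k hk => (List.mem_filter.mp hk).1
  have hMmid : ∀ k ∈ M, pvMidp k = true := by
    intro k hk
    have := (PySem.List.sorted_perm (d.keys.filter pvMidp) (fun k => k) false).mem_iff.mp (hM ▸ hk)
    exact (List.mem_filter.mp this).2
  have hMnotPr : ∀ k ∈ M, k ∉ pvPr := by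
    intro k hk hmem
    have := hMmid k hk
    simp [pvMidp] at this
    exact absurd hmem (by simpa using this.1)
  have hMnotTr : ∀ k ∈ M, k ∉ pvTr := by
    intro k hk hmem
    have := hMmid k hk
    simp [pvMidp] at this
    exact absurd hmem (by simpa using this.2)
  have hPMnd : (P ++ M).Nodup := by
    rw [List.nodup_append]
    refine ⟨((by decide : pvPr.Nodup).filter _),
      (PySem.List.sorted_perm _ _ _).nodup_iff.mpr (hnd.filter _), ?_⟩
    intro a ha b hb heq
    subst heq
    exact hMnotPr a hb (hPsub a ha)
  -- the combined fresh-key fold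
  have hitems2 : ((P ++ M).foldl (fun sd key => sd.insert key (d.getD key ""))
      (PySem.Dict.empty : PySem.Dict String String)).items
      = (P ++ M).map (fun k => (k, d.getD k "")) := by
    rw [PySem.Dict.items_foldl_insert_fresh _ (fun a => a) (fun a => d.getD a "") _
          (by intro a _; exact PySem.Dict.contains_empty a)
          (by simpa using hPMnd)]
    have hempty : (PySem.Dict.empty : PySem.Dict String String).items = [] := rfl
    rw [hempty, List.nil_append]
  set sd2 := (P ++ M).foldl (fun sd key => sd.insert key (d.getD key ""))
      (PySem.Dict.empty : PySem.Dict String String) with hsd2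
  have hkeys2 : sd2.keys = P ++ M := by
    show sd2.items.map (·.1) = P ++ M
    rw [hitems2, List.map_map]
    simp [Function.comp_def]
  have hnc2 : ∀ k', k' ∉ P ++ M → sd2.contains k' = false := by
    intro k' hk'
    cases hck : sd2.contains k' with
    | false => rfl
    | true =>
      exact absurd (hkeys2 ▸ (PySem.Dict.contains_iff_mem_keys sd2 k').mp hck) hk'
  have hctxPM : "@context" ∉ P ++ M := by
    rw [List.mem_append]
    rintro (h | h)
    · exact absurd (hPsub _ h) (by decide)
    · exact hMnotTr _ h (by decide)
  have htypePM : "type" ∉ P ++ M := by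
    rw [List.mem_append]
    rintro (h | h)
    · exact absurd (hPsub _ h) (by decide)
    · exact hMnotTr _ h (by decide)
  by_cases h1 : d.contains "@context" = true
    <;> by_cases h2 : d.contains "type" = true
  · -- both present
    rw [if_pos h1, if_pos h2]
    have e3 := PySem.Dict.items_insert_of_not_contains sd2 (d.getD "@context" "")
      (hnc2 _ hctxPM)
    have hk3 : (sd2.insert "@context" (d.getD "@context" "")).keys = P ++ M ++ ["@context"] := by
      show (sd2.insert "@context" (d.getD "@context" "")).items.map (·.1) = _
      rw [e3, List.map_append, hitems2, List.map_map]
      simp [Function.comp_def]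
    have hnc3 : (sd2.insert "@context" (d.getD "@context" "")).contains "type" = false := by
      cases hck : (sd2.insert "@context" (d.getD "@context" "")).contains "type" with
      | false => rfl
      | true =>
        have hmem := hk3 ▸ (PySem.Dict.contains_iff_mem_keys _ "type").mp hck
        rw [List.mem_append] at hmem
        rcases hmem with h | h
        · exact absurd h htypePM
        · simp at h
    rw [PySem.Dict.items_insert_of_not_contains _ (d.getD "type" "") hnc3, e3, hitems2]
    simp [List.map_append, List.append_assoc, h1, h2]
  · rw [if_pos h1, if_neg h2]
    have e3 := PySem.Dict.items_insert_of_not_contains sd2 (d.getD "@context" "")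
      (hnc2 _ hctxPM)
    rw [e3, hitems2]
    simp [List.map_append, List.append_assoc, h1, h2]
  · rw [if_neg h1, if_pos h2]
    rw [PySem.Dict.items_insert_of_not_contains sd2 (d.getD "type" "") (hnc2 _ htypePM), hitems2]
    simp [List.map_append, List.append_assoc, h1, h2]
  · rw [if_neg h1, if_neg h2, hitems2]
    simp [List.map_append, h1, h2]

theorem pv_main (data : List (String × String)) :
    sort_json_keys data = sort_json_keys_alt data := by
  unfold sort_json_keys sort_json_keys_alt
  have hnd : (PySem.Dict.ofList data).keys.Nodup := PySem.Dict.nodup_keys_ofList data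
  have hA := pv_A_eval (PySem.Dict.ofList data) hnd
  have hB := pv_B_eval (PySem.Dict.ofList data) hnd
  rw [pv_T_split] at hB
  exact hA.trans hB.symm

-- ===== VERDICT (by name: the statement is the Claim_ definition above) =====
theorem sort_json_keys_spec : Claim_equal_sort_json_keys := by
  intro data _
  unfold Spec_sort_json_keys
  exact pv_main data
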